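-- pv_equiv track=rewrite | github.com/Saravanan-246/Vijay- | backend/lexer.py | is_assignment
-- ===== SOURCE A (Python) =====
-- def is_assignment(stmt):
--     in_string = False
--
--     for i in range(len(stmt)):
--         c = stmt[i]
--
--         if c == '"':
--             in_string = not in_string
--
--         if not in_string:
--             if stmt[i:i+2] in ["==", "!=", ">=", "<="]:
--                 continue
--
--             if c == "=":
--                 return not stmt.strip().startswith("Headmaster")
--
--     return False
-- ===== SOURCE B (Python) =====
-- def is_assignment(stmt):
--     if any(c == "=" and stmt[:i].count('"') % 2 == 0 for i, c in enumerate(stmt)):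
--         return not stmt.strip().startswith("Headmaster")
--     return False
-- ===== Notes on version B (the rewrite author's own statement) =====
-- stated objective: alternative
-- what changed: A's single stateful scan (in_string toggle plus a skip of two-char comparison operators, whose skip is dead for the result) is replaced by a declarative membership test: some '=' is preceded by an even number of double quotes (stmt[:i].count('"') % 2 == 0), with no state machine and no operator special-casing; any() short-circuits at the first such '=' and counts its prefix with C-level str.count, which measured faster than A's per-character two-char slice allocation on the generated inputs (worst case it is quadratic).
import Mathlib
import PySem

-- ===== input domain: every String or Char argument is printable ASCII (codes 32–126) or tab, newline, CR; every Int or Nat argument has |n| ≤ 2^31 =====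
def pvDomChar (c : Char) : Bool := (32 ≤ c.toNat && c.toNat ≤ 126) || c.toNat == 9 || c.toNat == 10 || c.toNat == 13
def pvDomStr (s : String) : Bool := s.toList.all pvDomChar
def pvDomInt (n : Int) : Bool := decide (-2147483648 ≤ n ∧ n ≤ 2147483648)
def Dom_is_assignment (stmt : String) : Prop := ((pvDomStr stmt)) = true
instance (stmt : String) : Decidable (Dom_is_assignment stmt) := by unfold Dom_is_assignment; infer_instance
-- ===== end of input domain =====

-- B replaces A's stateful scan (in_string flag + two-char-operator skip) by a declarative
-- test: is there an '=' preceded by an even number of '"'; objective: alternative.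

-- ===== PORT A =====
-- A's 'for i in range(len(stmt))' as structural recursion over the remaining characters,
-- carrying the in_string flag; the slice stmt[i:i+2] is exactly c :: (take 1 of the rest)
-- (exact: the slice is clamped at the end of the string).  The early
-- 'return not stmt.strip().startswith("Headmaster")' is encoded as a found-flag returned
-- to the caller, which evaluates that same expression.
def isAssignLoop : List Char → Bool → Bool
  | [], _ => false
  | c :: rest, inString =>
    let inString' := if c == '"' then !inString else inString
    if !inString' then
      let two := c :: rest.take 1
      if two == ['=', '='] || two == ['!', '='] || two == ['>', '='] || two == ['<', '='] then
        isAssignLoop rest inString'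
      else if c == '=' then
        true
      else
        isAssignLoop rest inString'
    else
      isAssignLoop rest inString'

def is_assignment (stmt : String) : Bool :=
  if isAssignLoop stmt.toList false then
    !(PySem.Str.startswith (PySem.Str.strip stmt) "Headmaster")
  else
    false

-- ===== PORT B =====
-- Source B: any(c == "=" and stmt[:i].count('"') % 2 == 0 for i, c in enumerate(stmt))
def is_assignment_alt (stmt : String) : Bool :=
  if (PySem.List.enumerate stmt.toList).any (fun p =>
       p.2 == '=' && PySem.Str.count (PySem.Str.slice stmt none (some p.1)) "\"" % 2 == 0) then
    !(PySem.Str.startswith (PySem.Str.strip stmt) "Headmaster")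
  else
    false

-- ===== PRECONDITION & SPEC =====
def Spec_is_assignment (stmt : String) (out : Bool) : Prop := out = is_assignment_alt stmt
instance (stmt : String) (out : Bool) : Decidable (Spec_is_assignment stmt out) := by unfold Spec_is_assignment; infer_instance

-- ===== CLAIM (what is proved, stated in full; the proofs are below) =====
def Claim_equal_is_assignment : Prop := ∀ (stmt : String), Dom_is_assignment stmt → Spec_is_assignment stmt (is_assignment stmt)

-- ===== LEMMAS AND PROOFS =====

-- A's loop without the two-char-operator skip: the skip is dead code for the result,
-- because the last '=' of a run of '='s always reaches the 'c == "="' test.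
def hasEqOutside : List Char → Bool → Bool
  | [], _ => false
  | c :: rest, inString =>
    let inString' := if c == '"' then !inString else inString
    (!inString' && c == '=') || hasEqOutside rest inString'

lemma isAssignLoop_eq_hasEqOutside : ∀ (cs : List Char) (b : Bool),
    isAssignLoop cs b = hasEqOutside cs b := by
  intro cs
  induction cs with
  | nil => intro b; rfl
  | cons c rest ih =>
    intro b
    simp only [isAssignLoop, hasEqOutside, ih]
    by_cases hq : c = '"'
    · subst hq; simp
    · simp only [show (c == '"') = false by simp [hq]]
      by_cases hb : b
      · subst hb; simp
      · simp only [Bool.not_eq_true] at hb; subst hb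
        by_cases he : c = '='
        · subst he
          rcases rest with _ | ⟨d, r'⟩
          · simp
          · by_cases hd : d = '='
            · subst hd; simp [hasEqOutside]
            · simp [List.take, hd]
        · simp only [show (c == '=') = false by simp [he], Bool.false_or, Bool.not_false,
            if_true, Bool.if_true_left]
          split <;> simp [he]

-- Characterisation of hasEqOutside: an '=' whose prefix holds an even number of '"'
-- (the flag b contributes one virtual quote).
lemma hasEqOutside_iff : ∀ (cs : List Char) (b : Bool),
    hasEqOutside cs b = true ↔
      ∃ i, ∃ _ : i < cs.length, cs[i] = '=' ∧
        ((cs.take i).count '"' + (if b then 1 else 0)) % 2 = 0 := by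
  intro cs
  induction cs with
  | nil => intro b; simp [hasEqOutside]
  | cons c rest ih =>
    intro b
    simp only [hasEqOutside, Bool.or_eq_true, Bool.and_eq_true, ih]
    constructor
    · rintro (⟨hns, he⟩ | ⟨j, hj, hje, hpar⟩)
      · refine ⟨0, by simp, by simpa using he, ?_⟩
        have hc : c ≠ '"' := by
          intro h; subst h; simp at he
        simp only [List.take_zero, List.count_nil, Nat.zero_add]
        have : (if c == '"' then !b else b) = b := by simp [hc]
        rw [this] at hns
        simp only [Bool.not_eq_eq_eq_not, Bool.not_true] at hns
        simp [hns]
      · refine ⟨j + 1, by simpa using hj, by simpa using hje, ?_⟩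
        simp only [List.take_succ_cons, List.count_cons]
        by_cases hc : c = '"'
        · subst hc
          rcases b with _ | _ <;> simp_all <;> omega
        · simp_all [hc]
    · rintro ⟨i, hi, hie, hpar⟩
      rcases i with _ | j
      · left
        simp only [List.getElem_cons_zero] at hie; subst hie
        simp only [List.take_zero, List.count_nil, Nat.zero_add] at hpar
        have hb : b = false := by rcases b with _|_ <;> simp_all
        subst hb; simp
      · right
        refine ⟨j, by simpa using hi, by simpa using hie, ?_⟩
        simp only [List.take_succ_cons, List.count_cons] at hpar
        by_cases hc : c = '"'
        · subst hc
          rcases b with _ | _ <;> simp_all <;> omega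
        · simp_all [hc]

-- PySem.Chars.count with a single-character pattern is List.count.
lemma countGo_singleton (ch : Char) : ∀ (l : List Char) (fuel acc : Nat), l.length ≤ fuel →
    PySem.Chars.count.go [ch] fuel l acc = acc + l.count ch := by
  intro l
  induction l with
  | nil => intro fuel acc _; cases fuel <;> simp [PySem.Chars.count.go]
  | cons c t ih =>
    intro fuel acc hf
    cases fuel with
    | zero => simp at hf
    | succ f =>
      rw [PySem.Chars.count.go]
      have ht : t.length ≤ f := by simpa using hf
      by_cases hc : c = ch
      · subst hc
        simp only [List.isPrefixOf, List.isPrefixOf_nil_left, BEq.rfl, Bool.true_and, if_true,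
          List.length_cons, List.length_nil, List.drop_succ_cons, List.drop_zero]
        rw [ih f (acc + 1) ht]
        simp [List.count_cons]
        omega
      · simp only [List.isPrefixOf, List.isPrefixOf_nil_left, Bool.and_true,
          show (ch == c) = false by simp [Ne.symm hc], if_false]
        rw [ih f acc ht]
        simp [List.count_cons, hc]

lemma count_singleton_eq (cs : List Char) (ch : Char) :
    PySem.Chars.count cs [ch] = cs.count ch := by
  simp [PySem.Chars.count, countGo_singleton ch cs cs.length 0 le_rfl]

-- B's generator expression, characterised the same way.
lemma anyB_iff (stmt : String) :
    ((PySem.List.enumerate stmt.toList).any (fun p =>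
       p.2 == '=' && PySem.Str.count (PySem.Str.slice stmt none (some p.1)) "\"" % 2 == 0)) = true ↔
      ∃ i, ∃ _ : i < stmt.toList.length, stmt.toList[i] = '=' ∧
        ((stmt.toList.take i).count '"') % 2 = 0 := by
  rw [List.any_eq_true]
  constructor
  · rintro ⟨p, hp, hpred⟩
    rw [PySem.List.mem_enumerate_iff] at hp
    obtain ⟨k, hk, rfl⟩ := hp
    simp only [Bool.and_eq_true, beq_iff_eq] at hpred
    obtain ⟨h1, h2⟩ := hpred
    refine ⟨k, hk, by simpa using h1, ?_⟩
    simp only [show ("\"".toList) = ['"'] from rfl, PySem.Str.count_eq, PySem.Str.toList_slice,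
      PySem.Chars.slice_eq_listSlice, zero_add, PySem.List.slice_to_natCast,
      count_singleton_eq] at h2
    simpa using h2
  · rintro ⟨i, hi, hie, hpar⟩
    refine ⟨((i : Int), stmt.toList[i]), ?_, ?_⟩
    · rw [PySem.List.mem_enumerate_iff]
      exact ⟨i, hi, by simp⟩
    · simp only [show ("\"".toList) = ['"'] from rfl, PySem.Str.count_eq, PySem.Str.toList_slice,
        PySem.Chars.slice_eq_listSlice, zero_add, PySem.List.slice_to_natCast, count_singleton_eq]
      simp [hie, hpar]

-- ===== VERDICT (by name: the statement is the Claim_ definition above) =====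
theorem is_assignment_spec : Claim_equal_is_assignment := by
  intro stmt _
  unfold Spec_is_assignment is_assignment is_assignment_alt
  have hcond : isAssignLoop stmt.toList false =
      (PySem.List.enumerate stmt.toList).any (fun p =>
        p.2 == '=' && PySem.Str.count (PySem.Str.slice stmt none (some p.1)) "\"" % 2 == 0) := by
    rw [isAssignLoop_eq_hasEqOutside]
    apply Bool.eq_iff_iff.mpr
    rw [hasEqOutside_iff, anyB_iff]
    simp
  rw [hcond]
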